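-- pv_equiv track=rewrite | github.com/giordamaug/Embed_Clinical_Sequences_Asplenic | utils.py | group_events_by_visit
-- ===== SOURCE A (Python) =====
-- from collections import defaultdict
--
-- def group_events_by_visit(sequences):
--     visit_sequences= {}
--     for pid, events in sequences.items():
--         grouped_by_date = defaultdict(list)
--         for event, date in events:
--             grouped_by_date[date].append(event)
--         visit_sequences[pid] = [(grouped_by_date[date], date) for date in sorted(grouped_by_date.keys())]
--     return visit_sequences
-- ===== SOURCE B (Python) =====
-- def group_events_by_visit(sequences):
--     # sort-then-scan: stable-sort each patient's events by date, then group
--     # consecutive runs of equal dates in one linear pass (no intermediate dict).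
--     visit_sequences = {}
--     for pid, events in sequences.items():
--         visits = []
--         for event, date in sorted(events, key=lambda ev: ev[1]):
--             if visits and visits[-1][1] == date:
--                 visits[-1][0].append(event)
--             else:
--                 visits.append(([event], date))
--         visit_sequences[pid] = visits
--     return visit_sequences
-- ===== Notes on version B (the rewrite author's own statement) =====
-- stated objective: alternative
-- what changed: Replaces the per-patient defaultdict grouping plus sort of the distinct dates by a stable sort of the whole event list by date followed by one linear scan that groups consecutive runs of equal dates; sort stability keeps events in original order within each date.
import Mathlib
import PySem

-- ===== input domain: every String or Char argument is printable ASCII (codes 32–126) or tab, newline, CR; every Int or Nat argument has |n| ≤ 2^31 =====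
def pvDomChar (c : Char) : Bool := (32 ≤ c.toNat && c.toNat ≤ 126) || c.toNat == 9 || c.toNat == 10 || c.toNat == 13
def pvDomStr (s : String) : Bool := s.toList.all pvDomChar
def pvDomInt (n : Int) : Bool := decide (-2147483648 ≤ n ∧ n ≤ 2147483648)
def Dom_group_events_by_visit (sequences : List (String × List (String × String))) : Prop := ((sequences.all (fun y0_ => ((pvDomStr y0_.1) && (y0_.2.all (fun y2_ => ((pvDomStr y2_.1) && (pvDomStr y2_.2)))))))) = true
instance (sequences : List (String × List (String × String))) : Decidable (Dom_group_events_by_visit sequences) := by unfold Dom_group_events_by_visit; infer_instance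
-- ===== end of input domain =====

-- B replaces the per-patient defaultdict grouping + sort of distinct dates by a stable
-- sort of the events by date followed by one linear run-grouping scan (alternative algorithm, same results).


-- ===== PORT A =====
-- inner loop of A: grouped_by_date = defaultdict(list); append each event under its date;
-- then [(grouped_by_date[date], date) for date in sorted(grouped_by_date.keys())]
def pvGroupA (events : List (String × String)) : List (List String × String) :=
  let grouped := events.foldl (fun g e => g.modify e.2 [] (fun v => v ++ [e.1]))
    (PySem.Dict.empty : PySem.Dict String (List String))
  (PySem.List.sorted grouped.keys (fun d => d) false).map (fun date => (grouped.getD date [], date))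

def group_events_by_visit (sequences : List (String × List (String × String))) : List (String × List (List String × String)) :=
  (sequences.foldl (fun d pe => d.insert pe.1 (pvGroupA pe.2))
    (PySem.Dict.empty : PySem.Dict String (List (List String × String)))).items

-- ===== PORT B =====
-- loop body of B: if visits and visits[-1][1] == date: visits[-1][0].append(event) else visits.append(([event], date))
def pvStep (vs : List (List String × String)) (e : String × String) : List (List String × String) :=
  match vs.getLast? with
  | some last => if last.2 == e.2 then vs.dropLast ++ [(last.1 ++ [e.1], e.2)] else vs ++ [([e.1], e.2)]
  | none => [([e.1], e.2)]

def pvGroupB (events : List (String × String)) : List (List String × String) :=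
  (PySem.List.sorted events (fun e => e.2) false).foldl pvStep []

def group_events_by_visit_alt (sequences : List (String × List (String × String))) : List (String × List (List String × String)) :=
  (sequences.foldl (fun d pe => d.insert pe.1 (pvGroupB pe.2))
    (PySem.Dict.empty : PySem.Dict String (List (List String × String)))).items

-- ===== PRECONDITION & SPEC =====
def Spec_group_events_by_visit (sequences : List (String × List (String × String))) (out : List (String × List (List String × String))) : Prop := out = group_events_by_visit_alt sequences
instance (sequences : List (String × List (String × String))) (out : List (String × List (List String × String))) : Decidable (Spec_group_events_by_visit sequences out) := by unfold Spec_group_events_by_visit; infer_instance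

-- ===== CLAIM (what is proved, stated in full; the proofs are below) =====
def Claim_equal_group_events_by_visit : Prop := ∀ (sequences : List (String × List (String × String))), Dom_group_events_by_visit sequences → Spec_group_events_by_visit sequences (group_events_by_visit sequences)

-- ===== LEMMAS AND PROOFS =====

-- inserting x into a date-sorted list commutes with filtering on a fixed date (stability of insertion sort)
theorem pv_filter_insertBy (d : String) (x : String × String) (ys : List (String × String))
    (hs : ys.Pairwise (fun a b => a.2 ≤ b.2)) :
    (PySem.List.insertBy (fun a b => decide (a.2 < b.2)) x ys).filter (fun e => e.2 == d)
      = ys.filter (fun e => e.2 == d) ++ (if x.2 == d then [x] else []) := by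
  induction ys with
  | nil =>
    have hins : PySem.List.insertBy (fun a b => decide (a.2 < b.2)) x [] = [x] := rfl
    rw [hins]
    by_cases hxd : x.2 = d <;> simp [List.filter_cons, hxd]
  | cons y ys ih =>
    obtain ⟨hy, hs'⟩ := List.pairwise_cons.mp hs
    have hins : PySem.List.insertBy (fun a b => decide (a.2 < b.2)) x (y :: ys)
        = if decide (x.2 < y.2) = true then x :: y :: ys
          else y :: PySem.List.insertBy (fun a b => decide (a.2 < b.2)) x ys := rfl
    rw [hins]
    by_cases hxy : x.2 < y.2
    · rw [if_pos (by simpa using hxy)]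
      by_cases hxd : x.2 = d
      · have hnil : (y :: ys).filter (fun e => e.2 == d) = [] := by
          apply List.filter_eq_nil_iff.mpr
          intro z hz
          have hzy : y.2 ≤ z.2 := by
            rcases List.mem_cons.mp hz with h | h
            · exact le_of_eq (by rw [h])
            · exact hy z h
          have hdz : d < z.2 := lt_of_lt_of_le (hxd ▸ hxy) hzy
          simp only [beq_iff_eq]
          exact fun h => lt_irrefl d (h ▸ hdz)
        simp [List.filter_cons, hnil, hxd]
      · simp [List.filter_cons, hxd]
    · rw [if_neg (by simpa using hxy)]
      rw [List.filter_cons, List.filter_cons, ih hs']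
      by_cases hyd : y.2 = d <;> simp [hyd]

-- filtering by a fixed date commutes with the stable sort by date
theorem pv_filter_sorted (events : List (String × String)) (d : String) :
    (PySem.List.sorted events (fun e => e.2) false).filter (fun e => e.2 == d)
      = events.filter (fun e => e.2 == d) := by
  induction events using List.reverseRecOn with
  | nil => rw [PySem.List.sorted_eq_foldl_insertBy]; simp
  | append_singleton es x ih =>
    rw [PySem.List.sorted_eq_foldl_insertBy, List.foldl_append, List.foldl_cons, List.foldl_nil,
      ← PySem.List.sorted_eq_foldl_insertBy,
      pv_filter_insertBy d x _ (PySem.List.sorted_pairwise es (fun e => e.2)), ih,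
      List.filter_append]
    by_cases hxd : x.2 = d <;> simp [List.filter_cons, hxd]

-- A's inner grouping in closed form
theorem pvGroupA_eq (events : List (String × String)) :
    pvGroupA events
      = (PySem.List.sorted (PySem.Set.ofList (events.map (fun e => e.2))) (fun d => d) false).map
          (fun d => ((events.filter (fun e => e.2 == d)).map (fun e => e.1), d)) := by
  have hgetD : ∀ d0 : String,
      (events.foldl (fun g e => g.modify e.2 [] (fun v => v ++ [e.1]))
        (PySem.Dict.empty : PySem.Dict String (List String))).getD d0 []
      = (events.filter (fun e => e.2 == d0)).map (fun e => e.1) := by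
    intro d0
    have hm : (events.map (fun e : String × String => (e.2, e.1))).foldl
          (fun g p => g.modify p.1 [] (fun v => v ++ [p.2]))
          (PySem.Dict.empty : PySem.Dict String (List String))
        = events.foldl (fun g e => g.modify e.2 [] (fun v => v ++ [e.1]))
          (PySem.Dict.empty : PySem.Dict String (List String)) := by
      rw [List.foldl_map]
    rw [← hm, PySem.Dict.getD_foldl_modify_append]
    simp [List.filter_map, List.map_map, Function.comp_def]
  have hkeys :
      (events.foldl (fun g e => g.modify e.2 [] (fun v => v ++ [e.1]))
        (PySem.Dict.empty : PySem.Dict String (List String))).keys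
      = PySem.Set.ofList (events.map (fun e => e.2)) := by
    rw [PySem.Dict.keys_foldl_modify_key events (fun e => e.2) [] (fun _ e v => v ++ [e.1])]
    rfl
  unfold pvGroupA
  simp only [hgetD, hkeys]

theorem pv_ofList_sublist {α : Type} [BEq α] [LawfulBEq α] (l : List α) :
    (PySem.Set.ofList l : List α).Sublist l := by
  induction l using List.reverseRecOn with
  | nil => simp [PySem.Set.ofList, PySem.Set.empty]
  | append_singleton l x ih =>
    have h : (PySem.Set.ofList (l ++ [x]) : List α) = PySem.Set.add (PySem.Set.ofList l) x := by
      simp [PySem.Set.ofList, List.foldl_append]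
    rw [h]
    simp only [PySem.Set.add]
    split_ifs with hc
    · exact ih.trans (List.sublist_append_left l [x])
    · exact List.Sublist.append ih (List.Sublist.refl [x])

theorem pv_getLast_max {α : Type} [LinearOrder α] (D : List α) (x : α)
    (hD : D.Pairwise (· < ·)) (hx : x ∈ D) (hmax : ∀ y ∈ D, y ≤ x) :
    D.getLast? = some x := by
  revert hD hx hmax
  induction D with
  | nil => intro _ hx _; cases hx
  | cons y ys ih =>
    intro hD hx hmax
    cases ys with
    | nil =>
      have hxy : x = y := by simpa using hx
      simp [hxy]
    | cons z zs =>
      obtain ⟨hy, hD'⟩ := List.pairwise_cons.mp hD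
      have hxz : x ∈ z :: zs := by
        rcases List.mem_cons.mp hx with h | h
        · exfalso
          have h1 : y < z := hy z (List.mem_cons_self)
          have h2 : z ≤ x := hmax z (List.mem_cons_of_mem _ List.mem_cons_self)
          rw [h] at h2
          exact absurd h1 (not_lt.mpr h2)
        · exact h
      rw [List.getLast?_cons_cons]
      exact ih hD' hxz (fun w hw => hmax w (List.mem_cons_of_mem _ hw))

theorem pv_dedup_pairwise_lt (xs : List String) (h : xs.Pairwise (· ≤ ·)) :
    (PySem.List.dedup xs).Pairwise (· < ·) := by
  have hsub : (PySem.List.dedup xs).Sublist xs := pv_ofList_sublist xs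
  have hle : (PySem.List.dedup xs).Pairwise (· ≤ ·) := List.Pairwise.sublist hsub h
  have hnd : (PySem.List.dedup xs).Nodup := PySem.List.nodup_dedup xs
  exact (hle.and hnd).imp (fun hab => lt_of_le_of_ne hab.1 hab.2)

-- B's run-grouping scan over a date-sorted list, in closed form
theorem pv_runfold_eq (l : List (String × String)) (hl : l.Pairwise (fun a b => a.2 ≤ b.2)) :
    l.foldl pvStep []
      = (PySem.List.dedup (l.map (fun e => e.2))).map
          (fun d => ((l.filter (fun e => e.2 == d)).map (fun e => e.1), d)) := by
  revert hl
  induction l using List.reverseRecOn with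
  | nil => intro _; simp [PySem.List.dedup, PySem.Set.ofList, PySem.Set.empty]
  | append_singleton l e ih =>
    intro hl
    have hl' : l.Pairwise (fun a b => a.2 ≤ b.2) :=
      List.Pairwise.sublist (List.sublist_append_left l [e]) hl
    have hmax : ∀ a ∈ l, a.2 ≤ e.2 := by
      have h := (List.pairwise_append.mp hl).2.2
      intro a ha
      exact h a ha e List.mem_cons_self
    rw [List.foldl_append, List.foldl_cons, List.foldl_nil, ih hl']
    have hD : PySem.List.dedup ((l ++ [e]).map (fun x => x.2))
        = PySem.Set.add (PySem.List.dedup (l.map (fun x => x.2))) e.2 := by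
      simp [PySem.List.dedup, PySem.Set.ofList, List.foldl_append]
    rw [hD]
    have hfilt_ne : ∀ d : String, d ≠ e.2 →
        (l ++ [e]).filter (fun x => x.2 == d) = l.filter (fun x => x.2 == d) := by
      intro d hd
      rw [List.filter_append]
      simp [List.filter_cons, beq_iff_eq, Ne.symm hd]
    have hfilt_e : (l ++ [e]).filter (fun x => x.2 == e.2)
        = l.filter (fun x => x.2 == e.2) ++ [e] := by
      rw [List.filter_append]; simp
    by_cases hmem : e.2 ∈ l.map (fun x => x.2)
    · have hcont : PySem.Set.contains (PySem.List.dedup (l.map (fun x => x.2))) e.2 = true := by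
        have h := (PySem.List.mem_dedup (l.map (fun x => x.2)) e.2).mpr hmem
        simpa [PySem.Set.contains] using h
      have hadd : PySem.Set.add (PySem.List.dedup (l.map (fun x => x.2))) e.2
          = PySem.List.dedup (l.map (fun x => x.2)) := by
        simp only [PySem.Set.add, hcont]
        simp
      rw [hadd]
      have hlt : (PySem.List.dedup (l.map (fun x => x.2))).Pairwise (· < ·) :=
        pv_dedup_pairwise_lt _ (List.pairwise_map.mpr hl')
      have hmemD : e.2 ∈ PySem.List.dedup (l.map (fun x => x.2)) :=
        (PySem.List.mem_dedup _ _).mpr hmem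
      have hmaxD : ∀ y ∈ PySem.List.dedup (l.map (fun x => x.2)), y ≤ e.2 := by
        intro y hy
        obtain ⟨a, ha, rfl⟩ := List.mem_map.mp ((PySem.List.mem_dedup _ _).mp hy)
        exact hmax a ha
      have hDe : (PySem.List.dedup (l.map (fun x => x.2))).getLast? = some e.2 :=
        pv_getLast_max _ _ hlt hmemD hmaxD
      have hDne : PySem.List.dedup (l.map (fun x => x.2)) ≠ [] := by
        intro h; rw [h] at hDe; simp at hDe
      have hsplit : PySem.List.dedup (l.map (fun x => x.2))
          = (PySem.List.dedup (l.map (fun x => x.2))).dropLast ++ [e.2] := by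
        have h1 := List.dropLast_concat_getLast hDne
        have h2 : (PySem.List.dedup (l.map (fun x => x.2))).getLast hDne = e.2 := by
          have h3 := List.getLast?_eq_some_getLast hDne
          rw [h3] at hDe
          exact Option.some.inj hDe
        conv_lhs => rw [← h1]
        rw [h2]
      have hnotmem : e.2 ∉ (PySem.List.dedup (l.map (fun x => x.2))).dropLast := by
        have hnd := PySem.List.nodup_dedup (l.map (fun x => x.2))
        rw [hsplit] at hnd
        obtain ⟨-, -, hdisj⟩ := List.nodup_append.mp hnd
        intro h
        exact hdisj e.2 h e.2 List.mem_cons_self rfl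
      have hlast : ((PySem.List.dedup (l.map (fun x => x.2))).map
            (fun d => ((l.filter (fun e => e.2 == d)).map (fun e => e.1), d))).getLast?
          = some ((l.filter (fun x => x.2 == e.2)).map (fun x => x.1), e.2) := by
        rw [List.getLast?_map, hDe]; rfl
      simp only [pvStep, hlast]
      rw [if_pos (by simp)]
      conv_rhs => rw [hsplit]
      conv_lhs => rw [hsplit]
      simp only [List.map_append, List.map_cons, List.map_nil, List.dropLast_concat]
      congr 1
      · apply List.map_congr_left
        intro d hd
        have hdne : d ≠ e.2 := fun h => hnotmem (h ▸ hd)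
        rw [hfilt_ne d hdne]
      · simp [hfilt_e]
    · have hcont : PySem.Set.contains (PySem.List.dedup (l.map (fun x => x.2))) e.2 = false := by
        have h : e.2 ∉ PySem.List.dedup (l.map (fun x => x.2)) :=
          fun h => hmem ((PySem.List.mem_dedup _ _).mp h)
        simpa [PySem.Set.contains] using h
      have hadd : PySem.Set.add (PySem.List.dedup (l.map (fun x => x.2))) e.2
          = PySem.List.dedup (l.map (fun x => x.2)) ++ [e.2] := by
        simp only [PySem.Set.add, hcont]
        simp
      rw [hadd]
      have hfiltl : l.filter (fun x => x.2 == e.2) = [] := by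
        apply List.filter_eq_nil_iff.mpr
        intro a ha
        simp only [beq_iff_eq]
        exact fun h => hmem (List.mem_map.mpr ⟨a, ha, h⟩)
      have hmapcongr : (PySem.List.dedup (l.map (fun x => x.2))).map
            (fun d => (((l ++ [e]).filter (fun e => e.2 == d)).map (fun e => e.1), d))
          = (PySem.List.dedup (l.map (fun x => x.2))).map
            (fun d => ((l.filter (fun e => e.2 == d)).map (fun e => e.1), d)) := by
        apply List.map_congr_left
        intro d hd
        have hdne : d ≠ e.2 := by
          intro h
          rw [h] at hd
          exact hmem ((PySem.List.mem_dedup _ _).mp hd)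
        rw [hfilt_ne d hdne]
      rw [List.map_append, hmapcongr]
      cases hgl : (PySem.List.dedup (l.map (fun x => x.2))).getLast? with
      | none =>
        have hDnil : PySem.List.dedup (l.map (fun x => x.2)) = [] :=
          List.getLast?_eq_none_iff.mp hgl
        rw [hDnil]
        simp [pvStep, hfilt_e, hfiltl]
      | some dl =>
        have hdlD : dl ∈ PySem.List.dedup (l.map (fun x => x.2)) := List.mem_of_getLast? hgl
        have hdlne : (dl == e.2) = false := by
          simp only [beq_eq_false_iff_ne, ne_eq]
          intro h
          exact hmem ((PySem.List.mem_dedup _ _).mp (h ▸ hdlD))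
        have hlast : ((PySem.List.dedup (l.map (fun x => x.2))).map
              (fun d => ((l.filter (fun e => e.2 == d)).map (fun e => e.1), d))).getLast?
            = some ((l.filter (fun x => x.2 == dl)).map (fun x => x.1), dl) := by
          rw [List.getLast?_map, hgl]; rfl
        simp only [pvStep, hlast]
        rw [if_neg (by simp [hdlne])]
        simp [hfilt_e, hfiltl]

theorem pvGroupB_eq_pvGroupA (events : List (String × String)) :
    pvGroupB events = pvGroupA events := by
  unfold pvGroupB
  rw [pv_runfold_eq _ (PySem.List.sorted_pairwise events (fun e => e.2)), pvGroupA_eq]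
  simp only [pv_filter_sorted]
  have hperm : (PySem.List.dedup
        ((PySem.List.sorted events (fun e => e.2) false).map (fun e => e.2))).Perm
      (PySem.Set.ofList (events.map (fun e => e.2))) := by
    rw [List.perm_ext_iff_of_nodup (PySem.List.nodup_dedup _) (PySem.Set.nodup_ofList _)]
    intro a
    rw [PySem.List.mem_dedup, PySem.Set.mem_ofList]
    exact ((PySem.List.sorted_perm events (fun e => e.2) false).map (fun x => x.2)).mem_iff
  have hlt := pv_dedup_pairwise_lt
    ((PySem.List.sorted events (fun e => e.2) false).map (fun e => e.2))
    (List.pairwise_map.mpr (PySem.List.sorted_pairwise events (fun e => e.2)))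
  rw [PySem.List.sorted_eq_of_perm_of_pairwise_lt
    (PySem.Set.ofList (events.map (fun e => e.2))) _ (fun d => d) hperm hlt]

-- ===== VERDICT (by name: the statement is the Claim_ definition above) =====
theorem group_events_by_visit_spec : Claim_equal_group_events_by_visit := by
  intro sequences _
  unfold Spec_group_events_by_visit group_events_by_visit group_events_by_visit_alt
  simp only [pvGroupB_eq_pvGroupA]
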